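-- pv_equiv track=rewrite | github.com/mclovinsamsa/btctrading | src/research/search_space.py | generate_feature_sets
-- ===== SOURCE A (Python) =====
-- from itertools import combinations, product
-- from typing import Dict, Iterable, List
--
-- FEATURE_GROUPS: Dict[str, List[str]] = {
--     "momentum": ["ret_1", "ret_3", "ret_6", "ret_12", "ret_24"],
--     "candle": ["hl_range", "oc_change", "upper_wick", "lower_wick"],
--     "volume": ["vol_ratio_24"],
--     "volatility": ["volatility_24", "volatility_72"],
--     "trend": ["dist_ma_12", "dist_ma_24", "dist_ma_72"],
--     "indicators": ["rsi_14", "atr_pct_14"],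
--     "calendar": ["hour_of_day", "day_of_week"],
-- }
--
-- def generate_feature_sets(min_groups: int = 3, max_groups: int = 6) -> List[tuple]:
--     group_names = sorted(FEATURE_GROUPS.keys())
--     all_sets = []
--
--     for size in range(min_groups, max_groups + 1):
--         for subset in combinations(group_names, size):
--             # force un signal directionnel minimal
--             if "momentum" not in subset:
--                 continue
--             all_sets.append(subset)
--
--     return all_sets
-- ===== SOURCE B (Python) =====
-- from itertools import combinations
-- from typing import Dict, List
--
-- FEATURE_GROUPS: Dict[str, List[str]] = {
--     "momentum": ["ret_1", "ret_3", "ret_6", "ret_12", "ret_24"],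
--     "candle": ["hl_range", "oc_change", "upper_wick", "lower_wick"],
--     "volume": ["vol_ratio_24"],
--     "volatility": ["volatility_24", "volatility_72"],
--     "trend": ["dist_ma_12", "dist_ma_24", "dist_ma_72"],
--     "indicators": ["rsi_14", "atr_pct_14"],
--     "calendar": ["hour_of_day", "day_of_week"],
-- }
--
-- def generate_feature_sets(min_groups: int = 3, max_groups: int = 6) -> List[tuple]:
--     # Enumerate only the momentum-containing subsets directly: choose the
--     # remaining size-1 groups among the non-momentum names and re-insert
--     # "momentum" in sorted position.
--     others = sorted(name for name in FEATURE_GROUPS if name != "momentum")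
--     top = min(max_groups, len(FEATURE_GROUPS))  # no subset can use more groups than exist
--     return [tuple(sorted(combo + ("momentum",)))
--             for size in range(max(min_groups, 1), top + 1)
--             for combo in combinations(others, size - 1)]
-- ===== Notes on version B (the rewrite author's own statement) =====
-- stated objective: alternative
-- what changed: B enumerates only the momentum-containing subsets directly (combinations of the six non-momentum group names of size-1, with 'momentum' re-inserted in sorted position, as one comprehension) instead of enumerating all k-subsets of the seven names and filtering by membership.
-- crash fix: For min_groups < 0 with min_groups <= max_groups, A raises ValueError (combinations with negative r); B returns the momentum-containing subsets of the sizes up to max_groups (the empty list when max_groups < 1). — e.g. on generate_feature_sets(-1, 2): A raises ValueError, B returns [["momentum"], ["calendar", "momentum"], ["candle", "momentum"], ["indicators", "momentum"], ["momentum", "trend"], ["m…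
import Mathlib
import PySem

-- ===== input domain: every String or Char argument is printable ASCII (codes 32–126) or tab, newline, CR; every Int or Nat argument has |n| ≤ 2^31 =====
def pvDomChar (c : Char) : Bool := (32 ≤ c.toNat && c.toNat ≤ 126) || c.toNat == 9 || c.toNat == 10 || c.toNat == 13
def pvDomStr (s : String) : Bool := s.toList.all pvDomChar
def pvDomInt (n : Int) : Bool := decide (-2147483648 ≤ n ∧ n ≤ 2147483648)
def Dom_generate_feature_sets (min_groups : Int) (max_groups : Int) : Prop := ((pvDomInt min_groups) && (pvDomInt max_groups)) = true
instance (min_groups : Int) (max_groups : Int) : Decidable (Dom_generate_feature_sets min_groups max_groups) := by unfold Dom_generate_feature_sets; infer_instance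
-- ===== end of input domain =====

-- B enumerates only momentum-containing subsets directly (combinations of the six
-- non-momentum names with "momentum" re-inserted in sorted position) instead of
-- filtering all k-subsets of the seven names; alternative decomposition, same cost class.


-- ===== PORT A =====
-- module constant FEATURE_GROUPS (a dict in insertion order)
def pvFEATURE_GROUPS : PySem.Dict String (List String) :=
  PySem.Dict.ofList
    [("momentum", ["ret_1", "ret_3", "ret_6", "ret_12", "ret_24"]),
     ("candle", ["hl_range", "oc_change", "upper_wick", "lower_wick"]),
     ("volume", ["vol_ratio_24"]),
     ("volatility", ["volatility_24", "volatility_72"]),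
     ("trend", ["dist_ma_12", "dist_ma_24", "dist_ma_72"]),
     ("indicators", ["rsi_14", "atr_pct_14"]),
     ("calendar", ["hour_of_day", "day_of_week"])]

-- itertools.combinations(xs, r) in lexicographic order of positions (shared
-- standard-library helper, used by both ports). Exact for r ≥ 0; Python raises
-- ValueError for r < 0 (A reaches that only outside Pre_).
def pvCombinations : Nat → List String → List (List String)
  | 0, _ => [[]]
  | _ + 1, [] => []
  | n + 1, x :: rest => (pvCombinations n rest).map (fun c => x :: c) ++ pvCombinations (n + 1) rest

def generate_feature_sets (min_groups : Int) (max_groups : Int) : List (List String) :=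
  let group_names := PySem.List.sorted (pvFEATURE_GROUPS.keys) (fun x => x) false
  (PySem.List.pyRange min_groups (max_groups + 1) 1).foldl
    (fun all_sets size =>
      -- size.toNat: faithful for size ≥ 0; Python raises ValueError on negative size (outside Pre_)
      (pvCombinations size.toNat group_names).foldl
        (fun all_sets subset =>
          if subset.contains "momentum" then all_sets ++ [subset] else all_sets)
        all_sets)
    []

-- ===== PORT B =====
def generate_feature_sets_alt (min_groups : Int) (max_groups : Int) : List (List String) :=
  let others := PySem.List.sorted ((pvFEATURE_GROUPS.keys).filter (fun name => name != "momentum")) (fun x => x) false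
  let top := min max_groups (pvFEATURE_GROUPS.size : Int)
  (PySem.List.pyRange (max min_groups 1) (top + 1) 1).flatMap
    (fun size =>
      (pvCombinations (size - 1).toNat others).map
        (fun combo => PySem.List.sorted (combo ++ ["momentum"]) (fun x => x) false))

-- ===== PRECONDITION & SPEC =====
-- Pre_ excludes exactly the inputs where A raises ValueError: a nonempty range
-- starting at a negative size (combinations with negative r).
def Pre_generate_feature_sets (min_groups : Int) (max_groups : Int) : Prop :=
  0 ≤ min_groups ∨ max_groups < min_groups
instance (min_groups : Int) (max_groups : Int) : Decidable (Pre_generate_feature_sets min_groups max_groups) := by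
  unfold Pre_generate_feature_sets; infer_instance

def pvWitness_generate_feature_sets : Int × Int := (3, 6)

-- For min_groups < 0 with min_groups ≤ max_groups, A raises ValueError
-- (combinations with negative r); B returns the momentum-containing subsets of the sizes up to max_groups.
def Raises_generate_feature_sets (min_groups : Int) (max_groups : Int) : Prop :=
  min_groups < 0 ∧ min_groups ≤ max_groups
instance (min_groups : Int) (max_groups : Int) : Decidable (Raises_generate_feature_sets min_groups max_groups) := by
  unfold Raises_generate_feature_sets; infer_instance

def pvRaiseWitness_generate_feature_sets : Int × Int := (-1, 2)
def pvRaiseWitnessOut_generate_feature_sets : List (List String) :=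
  [["momentum"], ["calendar", "momentum"], ["candle", "momentum"], ["indicators", "momentum"],
   ["momentum", "trend"], ["momentum", "volatility"], ["momentum", "volume"]]

def Spec_generate_feature_sets (min_groups : Int) (max_groups : Int) (out : List (List String)) : Prop := out = generate_feature_sets_alt min_groups max_groups
instance (min_groups : Int) (max_groups : Int) (out : List (List String)) : Decidable (Spec_generate_feature_sets min_groups max_groups out) := by unfold Spec_generate_feature_sets; infer_instance

-- ===== CLAIM (what is proved, stated in full; the proofs are below) =====
def Claim_equal_generate_feature_sets : Prop := ∀ (min_groups : Int) (max_groups : Int), Dom_generate_feature_sets min_groups max_groups → Pre_generate_feature_sets min_groups max_groups → Spec_generate_feature_sets min_groups max_groups (generate_feature_sets min_groups max_groups)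

def Claim_raises_generate_feature_sets : Prop := (∀ (min_groups : Int) (max_groups : Int), Dom_generate_feature_sets min_groups max_groups → Raises_generate_feature_sets min_groups max_groups → ¬ Pre_generate_feature_sets min_groups max_groups) ∧ (Dom_generate_feature_sets (pvRaiseWitness_generate_feature_sets.1) (pvRaiseWitness_generate_feature_sets.2) ∧ Raises_generate_feature_sets (pvRaiseWitness_generate_feature_sets.1) (pvRaiseWitness_generate_feature_sets.2) ∧ generate_feature_sets_alt (pvRaiseWitness_generate_feature_sets.1) (pvRaiseWitness_generate_feature_sets.2) = pvRaiseWitnessOut_generate_feature_sets)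

-- ===== LEMMAS AND PROOFS =====

-- the seven sorted group names and the six non-momentum ones, as closed lists
def pvG : List String := PySem.List.sorted (pvFEATURE_GROUPS.keys) (fun x => x) false
def pvO : List String := PySem.List.sorted ((pvFEATURE_GROUPS.keys).filter (fun name => name != "momentum")) (fun x => x) false

-- A's per-size contribution and B's per-size contribution
def pvFA (size : Int) : List (List String) :=
  (pvCombinations size.toNat pvG).filter (fun subset => subset.contains "momentum")
def pvFB (size : Int) : List (List String) :=
  (pvCombinations (size - 1).toNat pvO).map
    (fun combo => PySem.List.sorted (combo ++ ["momentum"]) (fun x => x) false)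

theorem pvG_eq : pvG = ["calendar","candle","indicators","momentum","trend","volatility","volume"] := by
  simp [pvG, pvFEATURE_GROUPS, PySem.Dict.ofList, PySem.Dict.keys, PySem.Dict.empty,
        PySem.List.sorted]
  all_goals decide

theorem pvO_eq : pvO = ["calendar","candle","indicators","trend","volatility","volume"] := by
  simp [pvO, pvFEATURE_GROUPS, PySem.Dict.ofList, PySem.Dict.keys, PySem.Dict.empty,
        PySem.List.sorted]
  all_goals decide

theorem pvCombinations_nil (xs : List String) : ∀ n : Nat, xs.length < n → pvCombinations n xs = [] := by
  induction xs with
  | nil => intro n h; cases n with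
    | zero => omega
    | succ m => rfl
  | cons x rest ih =>
    intro n h
    cases n with
    | zero => omega
    | succ m =>
      simp only [pvCombinations]
      rw [ih m (by simpa using h), ih (m + 1) (by simp at h ⊢; omega)]
      rfl

theorem pvStep_nat : ∀ n : Nat, 1 ≤ n →
    (pvCombinations n pvG).filter (fun subset => subset.contains "momentum")
      = (pvCombinations (n - 1) pvO).map
          (fun combo => PySem.List.sorted (combo ++ ["momentum"]) (fun x => x) false) := by
  intro n hn
  by_cases h : n ≤ 7
  · rw [pvG_eq, pvO_eq]
    interval_cases n <;>
      (simp [pvCombinations, PySem.List.sorted, PySem.List.insertBy, List.filter]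
       all_goals decide)
  · have hG : pvG.length < n := by rw [pvG_eq]; simp; omega
    have hO : pvO.length < n - 1 := by rw [pvO_eq]; simp; omega
    rw [pvCombinations_nil pvG n hG, pvCombinations_nil pvO (n - 1) hO]
    rfl

theorem pvStep (size : Int) (h0 : 0 ≤ size) :
    pvFA size = if 1 ≤ size then pvFB size else [] := by
  by_cases h1 : 1 ≤ size
  · rw [if_pos h1]
    unfold pvFA pvFB
    have hcast : (size - 1).toNat = size.toNat - 1 := by omega
    rw [hcast]
    exact pvStep_nat size.toNat (by omega)
  · rw [if_neg h1]
    have hz : size = 0 := by omega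
    subst hz
    simp [pvFA, pvCombinations]

theorem generate_feature_sets_spec : Claim_equal_generate_feature_sets := by
  intro mn mx _ hpre
  unfold Spec_generate_feature_sets
  have hA : generate_feature_sets mn mx = (PySem.List.pyRange mn (mx + 1) 1).flatMap pvFA := by
    show (PySem.List.pyRange mn (mx + 1) 1).foldl
        (fun all_sets size =>
          (pvCombinations size.toNat pvG).foldl
            (fun all_sets subset =>
              if subset.contains "momentum" then all_sets ++ [subset] else all_sets)
            all_sets) []
        = (PySem.List.pyRange mn (mx + 1) 1).flatMap pvFA
    have hfun : (fun (all_sets : List (List String)) (size : Int) =>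
          (pvCombinations size.toNat pvG).foldl
            (fun all_sets subset =>
              if subset.contains "momentum" then all_sets ++ [subset] else all_sets)
            all_sets)
        = fun all_sets size => all_sets ++ pvFA size := by
      funext acc size
      simpa [pvFA] using
        PySem.List.foldl_append_if_eq_filter
          (l := pvCombinations size.toNat pvG)
          (p := fun subset => subset.contains "momentum") (acc := acc)
    rw [hfun, PySem.List.foldl_append_eq_flatMap]
    simp
  have hB : generate_feature_sets_alt mn mx
      = (PySem.List.pyRange (max mn 1) (min mx (pvFEATURE_GROUPS.size : Int) + 1) 1).flatMap pvFB := rfl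
  have hsz : (pvFEATURE_GROUPS.size : Int) = 7 := rfl
  rw [hA, hB, hsz]
  have hzero : ∀ size : Int, 8 ≤ size → pvFA size = [] := by
    intro size hs
    unfold pvFA
    rw [pvCombinations_nil pvG size.toNat (by rw [pvG_eq]; simp; omega)]
    rfl
  by_cases hord : mx < mn
  · rw [PySem.List.pyRange_one_eq_nil (by omega), PySem.List.pyRange_one_eq_nil (by omega)]
    rfl
  · have hmn0 : 0 ≤ mn := by
      rcases hpre with h | h
      · exact h
      · omega
    -- trim the front: the size-0 term (present only when mn = 0) contributes nothing
    have hfront : (PySem.List.pyRange mn (mx + 1) 1).flatMap pvFA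
        = (PySem.List.pyRange (max mn 1) (mx + 1) 1).flatMap pvFA := by
      by_cases h1 : 1 ≤ mn
      · have hmax : max mn 1 = mn := by omega
        rw [hmax]
      · have hz : mn = 0 := by omega
        subst hz
        have hmax : max (0 : Int) 1 = 1 := by omega
        rw [hmax, PySem.List.pyRange_one_cons (by omega)]
        have h0 : pvFA 0 = [] := by rw [pvStep 0 (by omega)]; rfl
        rw [List.flatMap_cons, h0, List.nil_append]
        norm_num
    -- trim the tail: sizes above the seven available groups contribute nothing
    have htail : (PySem.List.pyRange (max mn 1) (mx + 1) 1).flatMap pvFA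
        = (PySem.List.pyRange (max mn 1) (min mx 7 + 1) 1).flatMap pvFA := by
      by_cases h7 : mx ≤ 7
      · have : min mx 7 = mx := by omega
        rw [this]
      · have hmin : min mx 7 + 1 = (8 : Int) := by omega
        rw [hmin]
        by_cases ha : max mn 1 ≤ 8
        · rw [PySem.List.pyRange_one_append (max mn 1) 8 (mx + 1) ha (by omega),
              List.flatMap_append]
          have : (PySem.List.pyRange 8 (mx + 1) 1).flatMap pvFA = [] := by
            rw [List.flatMap_eq_nil_iff]
            intro x hx
            rw [PySem.List.mem_pyRange_one] at hx
            exact hzero x (by omega)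
          rw [this, List.append_nil]
        · rw [PySem.List.pyRange_one_eq_nil (show (8:Int) ≤ max mn 1 by omega),
              List.flatMap_nil, List.flatMap_eq_nil_iff]
          intro x hx
          rw [PySem.List.mem_pyRange_one] at hx
          exact hzero x (by omega)
    rw [hfront, htail]
    refine List.flatMap_congr ?_
    intro size hmem
    rw [PySem.List.mem_pyRange_one] at hmem
    rw [pvStep size (by omega), if_pos (by omega)]

@[simp]
theorem generate_feature_sets_raises : Claim_raises_generate_feature_sets := by
  unfold Claim_raises_generate_feature_sets
  constructor
  · intro mn mx _ hr
    unfold Raises_generate_feature_sets at hr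
    unfold Pre_generate_feature_sets
    omega
  · refine ⟨by decide, by decide, ?_⟩
    show generate_feature_sets_alt (-1) 2 = pvRaiseWitnessOut_generate_feature_sets
    simp [generate_feature_sets_alt, pvFEATURE_GROUPS, PySem.Dict.ofList, PySem.Dict.keys,
          PySem.Dict.empty, PySem.List.sorted,
          PySem.List.pyRange_one, pvRaiseWitnessOut_generate_feature_sets]
    all_goals decide
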